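-- pv_equiv track=rewrite | github.com/joonas-yoon/ps4ct | joonas/085.py | note2arr
-- ===== SOURCE A (Python) =====
-- def note2arr(notes, l):
--     a = []
--     ln = len(notes)
--     for i in range(max(2 * l, ln)):
--         o = notes[i % ln]
--         if o == '#':
--             a[-1] += 1
--         else:
--             a.append(2 * (ord(o) - ord('A')))
--     if l != -1:
--         return a[:l]
--     return a
-- ===== SOURCE B (Python) =====
-- def note2arr(notes, l):
--     # Parse notes once into its "unit" expansion, then tile by divmod
--     # instead of A's single cyclic modular re-scan.
--     unit = []
--     for o in notes:
--         if o == '#':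
--             unit[-1] += 1
--         else:
--             unit.append(2 * (ord(o) - ord('A')))
--     ln = len(notes)
--     n = max(2 * l, ln)
--     if n == 0:
--         return []
--     full, rem = divmod(n, ln)
--     a = unit * full
--     for o in notes[:rem]:
--         if o == '#':
--             a[-1] += 1
--         else:
--             a.append(2 * (ord(o) - ord('A')))
--     return a if l == -1 else a[:l]
-- ===== Notes on version B (the rewrite author's own statement) =====
-- stated objective: alternative
-- what changed: A expands the notes cyclically by re-indexing notes[i % ln] for every i in range(max(2*l, ln)); B parses notes once into its 'unit' expansion, tiles it with divmod (unit * full), and processes only the notes[:rem] prefix once more.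
import Mathlib
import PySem

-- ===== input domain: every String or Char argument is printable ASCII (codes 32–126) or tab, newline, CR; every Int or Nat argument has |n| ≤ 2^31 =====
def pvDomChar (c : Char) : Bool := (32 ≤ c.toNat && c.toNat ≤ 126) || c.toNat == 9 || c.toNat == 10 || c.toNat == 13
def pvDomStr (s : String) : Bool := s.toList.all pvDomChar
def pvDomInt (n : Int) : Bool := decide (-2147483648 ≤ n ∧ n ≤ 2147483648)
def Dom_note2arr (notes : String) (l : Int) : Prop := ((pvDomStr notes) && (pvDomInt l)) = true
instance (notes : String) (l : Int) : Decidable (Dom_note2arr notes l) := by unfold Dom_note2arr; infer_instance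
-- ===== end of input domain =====

-- B replaces A's cyclic modular re-scan by a one-pass parse of `notes` into its
-- "unit" expansion followed by divmod tiling (alternative decomposition, same cost).


-- ===== PORT A =====
-- shared loop body of both Pythons (identical text in Source A and Source B):
-- "if o == '#': a[-1] += 1 else: a.append(2 * (ord(o) - ord('A')))";
-- a[-1] access/update via pyGetD/pySetD (exact for nonempty a; empty a = IndexError, excluded by Pre_)
def noteStep (a : List Int) (o : Char) : List Int :=
  if o = '#' then PySem.List.pySetD a (-1) (PySem.List.pyGetD a (-1) 0 + 1)
  else a ++ [2 * ((o.toNat : Int) - 65)]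

def note2arr (notes : String) (l : Int) : List Int :=
  let cs := notes.toList
  let ln : Int := (cs.length : Int)
  let a := (PySem.List.pyRange 0 (max (2 * l) ln) 1).foldl
    (fun a i => noteStep a (PySem.List.pyGetD cs (PySem.Int.mod i ln) ' ')) []
  if l ≠ -1 then PySem.List.slice a none (some l) else a

-- ===== PORT B =====
def note2arr_alt (notes : String) (l : Int) : List Int :=
  let cs := notes.toList
  let unit := cs.foldl noteStep []
  let ln : Int := (cs.length : Int)
  let n := max (2 * l) ln
  if n = 0 then []
  else
    let full := PySem.Int.floordiv n ln
    let rem := PySem.Int.mod n ln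
    let a := (List.replicate full.toNat unit).flatten
    let a := (PySem.List.slice cs none (some rem)).foldl noteStep a
    if l = -1 then a else PySem.List.slice a none (some l)

-- ===== PRECONDITION & SPEC =====
-- Pre_ excludes exactly the inputs where A raises: notes starting with '#'
-- (IndexError on a[-1]) and empty notes with l > 0 (ZeroDivisionError in i % ln).
def Pre_note2arr (notes : String) (l : Int) : Prop :=
  notes.toList.head? ≠ some '#' ∧ (notes.toList = [] → l ≤ 0)
instance (notes : String) (l : Int) : Decidable (Pre_note2arr notes l) := by
  unfold Pre_note2arr; infer_instance
def pvWitness_note2arr : String × Int := ("A#B", 5)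

def Spec_note2arr (notes : String) (l : Int) (out : List Int) : Prop := out = note2arr_alt notes l
instance (notes : String) (l : Int) (out : List Int) : Decidable (Spec_note2arr notes l out) := by unfold Spec_note2arr; infer_instance

-- ===== CLAIM (what is proved, stated in full; the proofs are below) =====
def Claim_equal_note2arr : Prop := ∀ (notes : String) (l : Int), Dom_note2arr notes l → Pre_note2arr notes l → Spec_note2arr notes l (note2arr notes l)

-- ===== LEMMAS AND PROOFS =====

-- noteStep on a list with its last element exposed
theorem noteStep_concat (ys : List Int) (x : Int) (o : Char) :
    noteStep (ys ++ [x]) o =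
      if o = '#' then ys ++ [x + 1] else (ys ++ [x]) ++ [2 * ((o.toNat : Int) - 65)] := by
  unfold noteStep
  split_ifs with h
  · rw [PySem.List.pyGetD_neg_one_append_singleton]
    simp [PySem.List.pySetD, PySem.List.pySet?, PySem.List.pyIdx?]
  · rfl

theorem noteStep_ne_nil (b : List Int) (hb : b ≠ []) (o : Char) : noteStep b o ≠ [] := by
  obtain ⟨ys, x, rfl⟩ := List.eq_nil_or_concat b |>.resolve_left hb
  rw [List.concat_eq_append, noteStep_concat]; split_ifs <;> simp

theorem noteStep_append (a b : List Int) (hb : b ≠ []) (o : Char) :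
    noteStep (a ++ b) o = a ++ noteStep b o := by
  obtain ⟨ys, x, rfl⟩ := List.eq_nil_or_concat b |>.resolve_left hb
  rw [List.concat_eq_append, ← List.append_assoc, noteStep_concat, noteStep_concat]
  split_ifs <;> simp

-- fold from a ++ b never touches a while b stays nonempty
theorem foldl_noteStep_shift (cs : List Char) : ∀ (a b : List Int), b ≠ [] →
    cs.foldl noteStep (a ++ b) = a ++ cs.foldl noteStep b := by
  induction cs with
  | nil => intro a b _; rfl
  | cons c t ih =>
    intro a b hb
    simp only [List.foldl_cons, noteStep_append a b hb c]
    exact ih a (noteStep b c) (noteStep_ne_nil b hb c)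

-- a cycle whose first char is a letter appends exactly its unit expansion
theorem foldl_noteStep_unit (cs : List Char) (hc : cs.head? ≠ some '#') (a : List Int) :
    cs.foldl noteStep a = a ++ cs.foldl noteStep [] := by
  cases cs with
  | nil => simp
  | cons c t =>
    have hc' : ¬ c = '#' := by simpa using hc
    simp only [List.foldl_cons, noteStep, if_neg hc', List.nil_append]
    exact foldl_noteStep_shift t a [2 * ((c.toNat : Int) - 65)] (by simp)

theorem foldl_noteStep_tile (cs : List Char) (hc : cs.head? ≠ some '#') : ∀ (q : Nat) (a : List Int),
    (List.replicate q cs).flatten.foldl noteStep a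
      = a ++ (List.replicate q (cs.foldl noteStep [])).flatten := by
  intro q
  induction q with
  | zero => simp
  | succ q ih =>
    intro a
    simp only [List.replicate_succ, List.flatten_cons, List.foldl_append]
    rw [foldl_noteStep_unit cs hc a, ih]
    simp

-- the cyclically-indexed character sequence is a tiling of cs
theorem range_mod_map (cs : List Char) (hcs : cs ≠ []) (n : Nat) :
    (List.range n).map (fun k => cs.getD (k % cs.length) ' ')
      = (List.replicate (n / cs.length) cs).flatten ++ cs.take (n % cs.length) := by
  have hL : 0 < cs.length := List.length_pos_iff.mpr hcs
  -- first a take lemma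
  have htake : ∀ r : Nat, r ≤ cs.length →
      (List.range r).map (fun k => cs.getD (k % cs.length) ' ') = cs.take r := by
    intro r hr
    induction r with
    | zero => simp
    | succ r ih =>
      have hr' : r < cs.length := hr
      rw [List.range_succ, List.map_append, ih (Nat.le_of_lt hr'),
        List.take_add_one, List.getElem?_eq_getElem hr']
      simp only [List.map_cons, List.map_nil, Nat.mod_eq_of_lt hr', Option.toList_some,
        List.append_cancel_left_eq, List.cons.injEq, and_true]
      rw [List.getD_eq_getElem?_getD, List.getElem?_eq_getElem hr']
      rfl
  -- general statement via q, r
  suffices h : ∀ (q r : Nat), r < cs.length →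
      (List.range (q * cs.length + r)).map (fun k => cs.getD (k % cs.length) ' ')
        = (List.replicate q cs).flatten ++ cs.take r by
    have hdm : n / cs.length * cs.length + n % cs.length = n := Nat.div_add_mod' n cs.length
    have h2 := h (n / cs.length) (n % cs.length) (Nat.mod_lt n hL)
    rwa [hdm] at h2
  intro q
  induction q with
  | zero => intro r hr; simpa using htake r (Nat.le_of_lt hr)
  | succ q ih =>
    intro r hr
    have : (q + 1) * cs.length + r = cs.length + (q * cs.length + r) := by ring
    rw [this, List.range_add, List.map_append, List.map_map]
    have h1 : (List.range cs.length).map (fun k => cs.getD (k % cs.length) ' ') = cs := by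
      rw [htake cs.length le_rfl, List.take_length]
    have h2 : ((List.range (q * cs.length + r)).map
        ((fun k => cs.getD (k % cs.length) ' ') ∘ (cs.length + ·)))
        = (List.replicate q cs).flatten ++ cs.take r := by
      rw [← ih r hr]
      apply List.map_congr_left
      intro k _
      simp [Function.comp, Nat.add_mod_left]
    rw [h1, h2, List.replicate_succ, List.flatten_cons, List.append_assoc]

-- ===== VERDICT (by name: the statement is the Claim_ definition above) =====
theorem note2arr_spec : Claim_equal_note2arr := by
  intro notes l _hdom hpre
  obtain ⟨hhead, hnil⟩ := hpre
  unfold Spec_note2arr note2arr note2arr_alt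
  dsimp only
  cases hcs : notes.toList with
  | nil =>
    have hl : l ≤ 0 := hnil hcs
    have hmax : max (2 * l) ((([] : List Char).length : Int)) = 0 := by
      simp; omega
    rw [hmax, if_pos rfl, PySem.List.pyRange_one_eq_nil (by omega : (0:Int) ≤ 0), List.foldl_nil]
    split_ifs with h
    · simp [PySem.List.slice, PySem.List.clampIdx]
    · rfl
  | cons c0 t0 =>
    rw [hcs] at hhead
    set cs : List Char := c0 :: t0 with hcsdef
    have hcs_ne : cs ≠ [] := by simp [hcsdef]
    have hL : 0 < cs.length := List.length_pos_iff.mpr hcs_ne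
    set N : Int := max (2 * l) ((cs.length : Int)) with hN
    have hNpos : 0 < N := lt_of_lt_of_le (by exact_mod_cast hL) (le_max_right _ _)
    set n : Nat := N.toNat with hn
    have hNn : N = (n : Int) := (Int.toNat_of_nonneg (le_of_lt hNpos)).symm
    -- A's fold = fold of noteStep over the cyclic char sequence
    have hA : (PySem.List.pyRange 0 N 1).foldl
        (fun a i => noteStep a (PySem.List.pyGetD cs (PySem.Int.mod i ((cs.length : Int))) ' ')) []
        = ((List.range n).map (fun k => cs.getD (k % cs.length) ' ')).foldl noteStep [] := by
      rw [hNn, PySem.List.pyRange_one]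
      have harg : (((n : Int)) - 0).toNat = n := by omega
      rw [harg, List.foldl_map, List.foldl_map]
      simp only [zero_add, PySem.Int.mod_natCast, PySem.List.pyGetD_natCast]
    rw [hA, range_mod_map cs hcs_ne n, List.foldl_append,
      foldl_noteStep_tile cs hhead (n / cs.length) [], List.nil_append]
    -- B side
    have hne : ¬ N = 0 := by omega
    rw [if_neg hne]
    have hfull : (PySem.Int.floordiv N ((cs.length : Int))).toNat = n / cs.length := by
      rw [hNn, PySem.Int.floordiv_natCast, Int.toNat_natCast]
    have hrem : PySem.Int.mod N ((cs.length : Int)) = ((n % cs.length : Nat) : Int) := by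
      rw [hNn, PySem.Int.mod_natCast]
    rw [hfull, hrem, PySem.List.slice_to_natCast]
    by_cases hl : l = -1
    · simp [hl]
    · simp [hl]
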